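-- pv_equiv track=rewrite | github.com/bkmandge/Interview-Preparation | remove all chars except to alphabets.py | removeSpecialChars
-- ===== SOURCE A (Python) =====
-- def removeSpecialChars(s):
--     res = ""
--
--     for ch in s:
--         ascii = ord(ch)
--         # Finding the character whose ASCII value fall under this range
--         if ((ascii >= ord('A') and ascii <= ord('Z')) or
--             (ascii >= ord('a') and ascii <= ord('z')) or
--             (ascii > ord('0') and ascii <= ord('9'))
--             ):
--             res =  res + ch
--     return res
-- ===== SOURCE B (Python) =====
-- import re
--
-- def removeSpecialChars(s):
--     # Single regex substitution: delete everything except ASCII letters and digits 1-9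
--     # (digit '0' intentionally excluded, as in the original).
--     return re.sub(r'[^A-Za-z1-9]', '', s)
-- ===== Notes on version B (the rewrite author's own statement) =====
-- stated objective: idiomatic
-- what changed: Replaces the explicit per-character loop with ord-range branching and string concatenation by a single regex substitution deleting every character outside the class [A-Za-z1-9].
import Mathlib
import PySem

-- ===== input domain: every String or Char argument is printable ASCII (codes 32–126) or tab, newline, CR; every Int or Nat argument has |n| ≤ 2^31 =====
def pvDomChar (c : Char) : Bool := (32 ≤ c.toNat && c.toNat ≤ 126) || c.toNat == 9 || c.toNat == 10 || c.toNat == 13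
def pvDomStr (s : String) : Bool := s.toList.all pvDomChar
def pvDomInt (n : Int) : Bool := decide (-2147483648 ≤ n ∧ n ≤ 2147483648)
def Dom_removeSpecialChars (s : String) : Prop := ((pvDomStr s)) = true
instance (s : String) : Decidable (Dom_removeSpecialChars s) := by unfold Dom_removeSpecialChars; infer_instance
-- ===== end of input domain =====

-- B replaces A's per-character loop with ord-range branching by a single
-- regex-style substitution (a character-class filter over the string); idiomatic and measured faster (one C-level scan, no repeated concatenation).


-- ===== PORT A =====
-- literal loop: res starts empty; each char whose ord lies in the three ranges is appended
def removeSpecialChars (s : String) : String :=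
  s.toList.foldl (fun res ch =>
    let ascii := ch.toNat
    if (65 ≤ ascii ∧ ascii ≤ 90) ∨ (97 ≤ ascii ∧ ascii ≤ 122) ∨ (48 < ascii ∧ ascii ≤ 57)
    then res ++ ch.toString else res) ""

-- ===== PORT B =====
-- regex character class [^A-Za-z1-9]: deletion of non-matching chars = filter by class membership
def pvInClass (c : Char) : Bool :=
  ('A' ≤ c && c ≤ 'Z') || ('a' ≤ c && c ≤ 'z') || ('1' ≤ c && c ≤ '9')

def removeSpecialChars_alt (s : String) : String :=
  String.ofList (s.toList.filter pvInClass)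

-- ===== PRECONDITION & SPEC =====
def Spec_removeSpecialChars (s : String) (out : String) : Prop := out = removeSpecialChars_alt s
instance (s : String) (out : String) : Decidable (Spec_removeSpecialChars s out) := by unfold Spec_removeSpecialChars; infer_instance

-- ===== CLAIM (what is proved, stated in full; the proofs are below) =====
def Claim_equal_removeSpecialChars : Prop := ∀ (s : String), Dom_removeSpecialChars s → Spec_removeSpecialChars s (removeSpecialChars s)

-- ===== LEMMAS AND PROOFS =====
lemma pvCond_eq_inClass (ch : Char) :
    ((65 ≤ ch.toNat ∧ ch.toNat ≤ 90) ∨ (97 ≤ ch.toNat ∧ ch.toNat ≤ 122) ∨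
      (48 < ch.toNat ∧ ch.toNat ≤ 57)) ↔ pvInClass ch = true := by
  have h65 : ('A':Char).val.toNat = 65 := rfl
  have h90 : ('Z':Char).val.toNat = 90 := rfl
  have h97 : ('a':Char).val.toNat = 97 := rfl
  have h122 : ('z':Char).val.toNat = 122 := rfl
  have h49 : ('1':Char).val.toNat = 49 := rfl
  have h57 : ('9':Char).val.toNat = 57 := rfl
  simp only [pvInClass, Bool.or_eq_true, Bool.and_eq_true, decide_eq_true_eq,
    Char.le_def, UInt32.le_iff_toNat_le, Char.toNat, h65, h90, h97, h122, h49, h57]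
  omega

lemma pvFold_eq (l : List Char) (res : String) :
    l.foldl (fun res ch =>
      let ascii := ch.toNat
      if (65 ≤ ascii ∧ ascii ≤ 90) ∨ (97 ≤ ascii ∧ ascii ≤ 122) ∨ (48 < ascii ∧ ascii ≤ 57)
      then res ++ ch.toString else res) res = res ++ String.ofList (l.filter pvInClass) := by
  induction l generalizing res with
  | nil => simp
  | cons c t ih =>
    simp only [List.foldl_cons, List.filter_cons]
    by_cases h : pvInClass c = true
    · rw [if_pos ((pvCond_eq_inClass c).mpr h), ih, h]
      rw [← String.toList_inj]
      simp [String.toList_ofList]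
    · rw [if_neg (fun hc => h ((pvCond_eq_inClass c).mp hc)), ih]
      simp [h]

-- ===== VERDICT (by name: the statement is the Claim_ definition above) =====
theorem removeSpecialChars_spec : Claim_equal_removeSpecialChars := by
  intro s _
  unfold Spec_removeSpecialChars removeSpecialChars removeSpecialChars_alt
  rw [pvFold_eq]
  rfl
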